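-- pv_equiv track=rewrite | github.com/Uvais5/NLP-Query-Engine-for-Employee-Data | routes/schema.py | map_semantic_columns
-- ===== SOURCE A (Python) =====
-- def map_semantic_columns(columns: list) -> dict:
--     """Map columns to semantic meanings"""
--     mapping = {}
--     column_names = [col['name'].lower() for col in columns]
--
--     # Define semantic patterns
--     patterns = {
--         'id': ['id', 'emp_id', 'employee_id', 'person_id', 'staff_id'],
--         'name': ['name', 'full_name', 'employee_name', 'first_name'],
--         'salary': ['salary', 'annual_salary', 'compensation', 'pay', 'pay_rate'],
--         'department': ['department', 'dept', 'division', 'dept_id', 'dept_name'],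
--         'position': ['position', 'title', 'role', 'job_title'],
--         'hire_date': ['join_date', 'hire_date', 'hired_on', 'start_date']
--     }
--
--     for semantic_name, pattern_list in patterns.items():
--         for col_name in column_names:
--             for pattern in pattern_list:
--                 if pattern in col_name:
--                     original_name = next(col['name'] for col in columns if col['name'].lower() == col_name)
--                     mapping[semantic_name] = original_name
--                     break
--             if semantic_name in mapping:
--                 break
--
--     return mapping
-- ===== SOURCE B (Python) =====
-- def map_semantic_columns(columns: list) -> dict:
--     """Map columns to semantic meanings"""
--     patterns = {
--         'id': ['id', 'emp_id', 'employee_id', 'person_id', 'staff_id'],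
--         'name': ['name', 'full_name', 'employee_name', 'first_name'],
--         'salary': ['salary', 'annual_salary', 'compensation', 'pay', 'pay_rate'],
--         'department': ['department', 'dept', 'division', 'dept_id', 'dept_name'],
--         'position': ['position', 'title', 'role', 'job_title'],
--         'hire_date': ['join_date', 'hire_date', 'hired_on', 'start_date']
--     }
--     # single forward pass over columns: first matching column wins per category
--     found = {}
--     for col in columns:
--         original = col['name']
--         low = original.lower()
--         for semantic_name, pattern_list in patterns.items():
--             if semantic_name not in found and any(p in low for p in pattern_list):
--                 found[semantic_name] = original
--     # present the result in the fixed category order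
--     return {sem: found[sem] for sem in patterns if sem in found}
-- ===== Notes on version B (the rewrite author's own statement) =====
-- stated objective: idiomatic
-- what changed: Replaced the category-outer loop with its inner rescans (per category a scan over all column names plus a next(...) rescan of columns to recover the original name) by one forward pass over columns that lowercases each name once and records the first match per category, then emits the result in fixed category order.
import Mathlib
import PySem

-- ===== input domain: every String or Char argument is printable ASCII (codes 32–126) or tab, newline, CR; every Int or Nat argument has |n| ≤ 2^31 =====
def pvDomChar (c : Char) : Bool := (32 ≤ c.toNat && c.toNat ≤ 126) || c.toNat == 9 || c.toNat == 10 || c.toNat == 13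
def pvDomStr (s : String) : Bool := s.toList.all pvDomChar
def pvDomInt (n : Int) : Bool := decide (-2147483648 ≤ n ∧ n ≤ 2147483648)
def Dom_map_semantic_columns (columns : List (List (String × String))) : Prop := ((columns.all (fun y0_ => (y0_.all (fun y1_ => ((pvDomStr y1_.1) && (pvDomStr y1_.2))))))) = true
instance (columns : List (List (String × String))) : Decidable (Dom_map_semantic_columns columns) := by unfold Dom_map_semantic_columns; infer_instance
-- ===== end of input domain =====

-- B replaces A's category-outer loops and next(...) rescan with one forward pass over
-- columns recording the first match per category (idiomatic; same asymptotic cost).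

-- shared constant: the literal `patterns` table both Pythons define
def semanticPatterns : List (String × List String) :=
  [ ("id", ["id", "emp_id", "employee_id", "person_id", "staff_id"]),
    ("name", ["name", "full_name", "employee_name", "first_name"]),
    ("salary", ["salary", "annual_salary", "compensation", "pay", "pay_rate"]),
    ("department", ["department", "dept", "division", "dept_id", "dept_name"]),
    ("position", ["position", "title", "role", "job_title"]),
    ("hire_date", ["join_date", "hire_date", "hired_on", "start_date"]) ]

-- col['name'] (exact under Pre_, which excludes the KeyError case)
def colNameOf (col : List (String × String)) : String :=
  ((PySem.Dict.mk col).get? "name").getD ""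

-- ===== PORT A =====
-- innermost `for pattern in pattern_list: if pattern in col_name: … break`
def aPatLoop (columns : List (List (String × String)))
    (mapping : PySem.Dict String String) (sem : String) (colName : String) :
    List String → PySem.Dict String String
  | [] => mapping
  | p :: ps =>
    if PySem.Str.isIn p colName then
      -- next(col['name'] for col in columns if col['name'].lower() == col_name)
      let original :=
        ((columns.find? (fun col => PySem.Str.lower (colNameOf col) == colName)).map colNameOf).getD ""
      mapping.insert sem original
    else aPatLoop columns mapping sem colName ps

-- `for col_name in column_names: …; if semantic_name in mapping: break`
def aColLoop (columns : List (List (String × String)))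
    (mapping : PySem.Dict String String) (sem : String) (plist : List String) :
    List String → PySem.Dict String String
  | [] => mapping
  | cn :: rest =>
    let mapping' := aPatLoop columns mapping sem cn plist
    if mapping'.contains sem then mapping'
    else aColLoop columns mapping' sem plist rest

def map_semantic_columns (columns : List (List (String × String))) : List (String × String) :=
  let column_names := columns.map (fun col => PySem.Str.lower (colNameOf col))
  (semanticPatterns.foldl
    (fun mapping sp => aColLoop columns mapping sp.1 sp.2 column_names)
    PySem.Dict.empty).items

-- ===== PORT B =====
-- body of `for col in columns:` — one column updates `found` for every category
def bColStep (found : PySem.Dict String String) (col : List (String × String)) :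
    PySem.Dict String String :=
  let original := colNameOf col
  let low := PySem.Str.lower original
  semanticPatterns.foldl
    (fun f sp =>
      if !f.contains sp.1 && sp.2.any (fun p => PySem.Str.isIn p low) then f.insert sp.1 original
      else f)
    found

def map_semantic_columns_alt (columns : List (List (String × String))) : List (String × String) :=
  let found := columns.foldl bColStep PySem.Dict.empty
  -- {sem: found[sem] for sem in patterns if sem in found}
  (semanticPatterns.foldl
    (fun d sp =>
      match found.get? sp.1 with
      | some v => d.insert sp.1 v
      | none => d)
    PySem.Dict.empty).items

-- ===== PRECONDITION & SPEC =====
-- Pre_ excludes exactly the columns lacking a 'name' key, where Python A raises KeyError.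
def Pre_map_semantic_columns (columns : List (List (String × String))) : Prop :=
  (columns.all (fun col => col.any (fun p => p.1 == "name"))) = true
instance (columns : List (List (String × String))) : Decidable (Pre_map_semantic_columns columns) := by unfold Pre_map_semantic_columns; infer_instance
def pvWitness_map_semantic_columns : (List (List (String × String))) :=
  [[("name", "Emp_ID"), ("type", "int")], [("name", "Full_Name")]]

def Spec_map_semantic_columns (columns : List (List (String × String))) (out : List (String × String)) : Prop := out = map_semantic_columns_alt columns
instance (columns : List (List (String × String))) (out : List (String × String)) : Decidable (Spec_map_semantic_columns columns out) := by unfold Spec_map_semantic_columns; infer_instance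

-- ===== CLAIM (what is proved, stated in full; the proofs are below) =====
def Claim_equal_map_semantic_columns : Prop := ∀ (columns : List (List (String × String))), Dom_map_semantic_columns columns → Pre_map_semantic_columns columns → Spec_map_semantic_columns columns (map_semantic_columns columns)

-- ===== LEMMAS AND PROOFS =====

-- whether a column matches a pattern list
def colMatches (plist : List String) (col : List (String × String)) : Bool :=
  plist.any (fun p => PySem.Str.isIn p (PySem.Str.lower (colNameOf col)))

-- the first matching column's original name, per category: the common value both ports compute
def firstMatch (columns : List (List (String × String))) (plist : List String) : Option String :=
  (columns.find? (colMatches plist)).map colNameOf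

theorem aPatLoop_eq (columns : List (List (String × String)))
    (mapping : PySem.Dict String String) (sem : String) (colName : String)
    (plist : List String) :
    aPatLoop columns mapping sem colName plist =
      if plist.any (fun p => PySem.Str.isIn p colName) then
        mapping.insert sem
          (((columns.find? (fun col => PySem.Str.lower (colNameOf col) == colName)).map colNameOf).getD "")
      else mapping := by
  induction plist with
  | nil => simp [aPatLoop]
  | cons p ps ih =>
    simp only [aPatLoop, List.any_cons]
    by_cases h : PySem.Str.isIn p colName = true
    · rw [if_pos h, if_pos (by rw [h]; rfl)]
    · have hF : PySem.Str.isIn p colName = false := by simpa using h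
      rw [if_neg h, ih]
      simp only [hF, Bool.false_or]

theorem aColLoop_eq (columns : List (List (String × String)))
    (sem : String) (plist : List String)
    (suf pre : List (List (String × String)))
    (h : columns = pre ++ suf)
    (hpre : ∀ c ∈ pre, colMatches plist c = false)
    (mapping : PySem.Dict String String)
    (hm : mapping.contains sem = false) :
    aColLoop columns mapping sem plist (suf.map (fun col => PySem.Str.lower (colNameOf col))) =
      match firstMatch columns plist with
      | some v => mapping.insert sem v
      | none => mapping := by
  induction suf generalizing pre with
  | nil =>
    have hnone : columns.find? (colMatches plist) = none := by
      apply List.find?_eq_none.mpr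
      intro c hc
      simp [hpre c (by simpa [h] using hc)]
    simp [aColLoop, firstMatch, hnone]
  | cons c rest ih =>
    simp only [List.map_cons, aColLoop, aPatLoop_eq]
    by_cases hmatch : colMatches plist c = true
    · -- c is the first matching column
      have hprenone0 : pre.find? (colMatches plist) = none :=
        List.find?_eq_none.mpr (fun x hx => by simp [hpre x hx])
      have hfind : columns.find? (colMatches plist) = some c := by
        rw [h, List.find?_append, hprenone0, Option.none_or, List.find?_cons_of_pos hmatch]
      have horig : columns.find?
          (fun col => PySem.Str.lower (colNameOf col) == PySem.Str.lower (colNameOf c)) = some c := by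
        have hprenone : pre.find?
            (fun col => PySem.Str.lower (colNameOf col) == PySem.Str.lower (colNameOf c)) = none := by
          apply List.find?_eq_none.mpr
          intro x hx
          simp only [beq_iff_eq]
          intro heq
          have hx2 : colMatches plist x = true := by
            unfold colMatches at hmatch ⊢
            rw [heq]; exact hmatch
          rw [hpre x hx] at hx2; exact absurd hx2 (by simp)
        rw [h, List.find?_append, hprenone, Option.none_or,
          List.find?_cons_of_pos (by simp)]
      have hany : (plist.any fun p => PySem.Str.isIn p (PySem.Str.lower (colNameOf c))) = true := hmatch
      rw [if_pos hany, horig]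
      simp only [Option.map_some, Option.getD_some]
      rw [if_pos (PySem.Dict.contains_insert_self mapping sem (colNameOf c))]
      have hfm : firstMatch columns plist = some (colNameOf c) := by
        rw [firstMatch, hfind]; rfl
      rw [hfm]
    · -- c does not match: mapping unchanged, keep scanning
      have hmF : colMatches plist c = false := by simpa using hmatch
      have hany : (plist.any fun p => PySem.Str.isIn p (PySem.Str.lower (colNameOf c))) = false := hmF
      rw [if_neg (ne_true_of_eq_false hany), if_neg (ne_true_of_eq_false hm)]
      exact ih (pre ++ [c]) (by simp [h]) (by
        intro x hx
        rcases List.mem_append.mp hx with hx | hx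
        · exact hpre x hx
        · simp at hx; subst hx; exact hmF)

-- A's category loop, over any suffix of the pattern table with fresh distinct keys
theorem aFoldl_items (columns : List (List (String × String)))
    (L : List (String × List String)) (mapping : PySem.Dict String String)
    (hnd : (L.map (·.1)).Nodup)
    (hfresh : ∀ sp ∈ L, mapping.contains sp.1 = false) :
    (L.foldl (fun m sp => aColLoop columns m sp.1 sp.2
        (columns.map (fun col => PySem.Str.lower (colNameOf col)))) mapping).items =
      mapping.items ++ L.filterMap (fun sp => (firstMatch columns sp.2).map (fun v => (sp.1, v))) := by
  induction L generalizing mapping with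
  | nil => simp
  | cons sp rest ih =>
    have hnd2 : sp.1 ∉ rest.map (·.1) ∧ (rest.map (·.1)).Nodup := by
      rw [List.map_cons, List.nodup_cons] at hnd; exact hnd
    simp only [List.foldl_cons, List.filterMap_cons]
    have hstep := aColLoop_eq columns sp.1 sp.2 columns [] rfl (by simp) mapping
      (hfresh sp (by simp))
    cases hfm : firstMatch columns sp.2 with
    | none =>
      rw [hstep]
      simp only [hfm]
      rw [ih mapping hnd2.2 (fun q hq => hfresh q (by simp [hq]))]
      simp
    | some v =>
      rw [hstep]
      simp only [hfm]
      have hne : ∀ q ∈ rest, q.1 ≠ sp.1 := by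
        intro q hq heq
        exact hnd2.1 (heq ▸ List.mem_map_of_mem (f := (·.1)) hq)
      rw [ih (mapping.insert sp.1 v) hnd2.2
        (fun q hq => by
          rw [PySem.Dict.contains_insert]
          simp [hne q hq, hfresh q (by simp [hq])])]
      rw [PySem.Dict.items_insert_of_not_contains _ _ (hfresh sp (by simp))]
      simp

-- get? at a key not present in the pattern-table suffix is untouched by B's inner fold
theorem bInner_get?_notmem (low original : String) (sem : String)
    (L : List (String × List String)) (f : PySem.Dict String String)
    (hsem : sem ∉ L.map (·.1)) :
    (L.foldl (fun f sp =>
      if !f.contains sp.1 && sp.2.any (fun p => PySem.Str.isIn p low) then f.insert sp.1 original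
      else f) f).get? sem = f.get? sem := by
  induction L generalizing f with
  | nil => rfl
  | cons sp rest ih =>
    simp only [List.map_cons, List.mem_cons, not_or] at hsem
    simp only [List.foldl_cons]
    rw [ih _ hsem.2]
    split
    · exact PySem.Dict.get?_insert_of_ne _ _ hsem.1
    · rfl

-- B's inner fold: effect on get? at a pattern-table key
theorem bInner_get? (low original : String) (sem : String) (plist : List String)
    (L : List (String × List String)) (f : PySem.Dict String String)
    (hnd : (L.map (·.1)).Nodup) (hmem : (sem, plist) ∈ L) :
    (L.foldl (fun f sp =>
      if !f.contains sp.1 && sp.2.any (fun p => PySem.Str.isIn p low) then f.insert sp.1 original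
      else f) f).get? sem =
      if f.contains sem = false ∧ (plist.any (fun p => PySem.Str.isIn p low)) = true then some original
      else f.get? sem := by
  induction L generalizing f with
  | nil => simp at hmem
  | cons sp rest ih =>
    obtain ⟨k, pl⟩ := sp
    have hnd2 : k ∉ rest.map (·.1) ∧ (rest.map (·.1)).Nodup := by
      rw [List.map_cons, List.nodup_cons] at hnd; exact hnd
    simp only [List.foldl_cons]
    rcases List.mem_cons.mp hmem with heq | hmem'
    · -- the head entry is this category
      cases heq
      rw [bInner_get?_notmem low original sem rest _ hnd2.1]
      by_cases hc : f.contains sem = true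
      · rw [if_neg (by rw [hc]; simp), if_neg (by rintro ⟨h1, _⟩; rw [hc] at h1; cases h1)]
      · have hcF : f.contains sem = false := by simpa using hc
        by_cases ha : (plist.any fun p => PySem.Str.isIn p low) = true
        · rw [if_pos (by rw [hcF, ha]; rfl), PySem.Dict.get?_insert_self, if_pos ⟨hcF, ha⟩]
        · have haF : (plist.any fun p => PySem.Str.isIn p low) = false := by simpa using ha
          rw [if_neg (by rw [hcF, haF]; simp), if_neg (by rintro ⟨_, h2⟩; exact ha h2)]
    · -- the head entry is another category
      have hne : k ≠ sem := fun h2 => hnd2.1 (h2 ▸ List.mem_map_of_mem (f := (·.1)) hmem')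
      by_cases hguard : (!f.contains k && pl.any fun p => PySem.Str.isIn p low) = true
      · rw [if_pos hguard, ih _ hnd2.2 hmem']
        have h1 : (f.insert k original).contains sem = f.contains sem := by
          rw [PySem.Dict.contains_insert]
          simp [Ne.symm hne]
        rw [h1, PySem.Dict.get?_insert_of_ne _ _ (Ne.symm hne)]
      · rw [if_neg hguard, ih _ hnd2.2 hmem']

-- B's outer fold over the columns computes firstMatch per category
theorem bFold_get? (sem : String) (plist : List String)
    (hmem : (sem, plist) ∈ semanticPatterns)
    (columns : List (List (String × String))) (f : PySem.Dict String String) :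
    (columns.foldl bColStep f).get? sem = (f.get? sem).or (firstMatch columns plist) := by
  induction columns generalizing f with
  | nil => simp [firstMatch]
  | cons c cs ih =>
    have hnd : (semanticPatterns.map (·.1)).Nodup := by decide
    simp only [List.foldl_cons]
    rw [ih]
    have hstep := bInner_get? (PySem.Str.lower (colNameOf c)) (colNameOf c) sem plist
      semanticPatterns f hnd hmem
    show ((bColStep f c).get? sem).or (firstMatch cs plist) = (f.get? sem).or (firstMatch (c :: cs) plist)
    simp only [bColStep]
    rw [hstep]
    by_cases hc : f.contains sem = true
    · have hv : ∃ v, f.get? sem = some v := by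
        have h0 := PySem.Dict.contains_eq_isSome_get? f sem
        rw [hc] at h0
        exact Option.isSome_iff_exists.mp h0.symm
      rcases hv with ⟨v, hv⟩
      rw [if_neg (by rintro ⟨h1, _⟩; rw [hc] at h1; cases h1), hv, Option.some_or, Option.some_or]
    · have hcF : f.contains sem = false := by simpa using hc
      have hgnone : f.get? sem = none := by
        have h0 := PySem.Dict.contains_eq_isSome_get? f sem
        rw [hcF] at h0
        cases hg : f.get? sem with
        | none => rfl
        | some v => rw [hg] at h0; simp at h0
      by_cases hm : colMatches plist c = true
      · have hany : (plist.any fun p => PySem.Str.isIn p (PySem.Str.lower (colNameOf c))) = true := hm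
        rw [if_pos ⟨hcF, hany⟩, hgnone, Option.some_or, Option.none_or]
        rw [firstMatch, List.find?_cons_of_pos hm]
        rfl
      · have hmF : colMatches plist c = false := by simpa using hm
        have hany : (plist.any fun p => PySem.Str.isIn p (PySem.Str.lower (colNameOf c))) = false := hmF
        rw [if_neg (by rintro ⟨_, h2⟩; rw [hany] at h2; cases h2), hgnone, Option.none_or, Option.none_or]
        show firstMatch cs plist = firstMatch (c :: cs) plist
        rw [firstMatch, firstMatch, List.find?_cons_of_neg (ne_true_of_eq_false hmF)]

-- B's final comprehension, over any suffix of the pattern table with fresh distinct keys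
theorem bFinal_items (g : String × List String → Option String)
    (L : List (String × List String)) (d : PySem.Dict String String)
    (hnd : (L.map (·.1)).Nodup)
    (hfresh : ∀ sp ∈ L, d.contains sp.1 = false) :
    (L.foldl (fun d sp =>
        match g sp with
        | some v => d.insert sp.1 v
        | none => d) d).items =
      d.items ++ L.filterMap (fun sp => (g sp).map (fun v => (sp.1, v))) := by
  induction L generalizing d with
  | nil => simp
  | cons sp rest ih =>
    have hnd2 : sp.1 ∉ rest.map (·.1) ∧ (rest.map (·.1)).Nodup := by
      rw [List.map_cons, List.nodup_cons] at hnd; exact hnd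
    simp only [List.foldl_cons, List.filterMap_cons]
    cases hg : g sp with
    | none =>
      rw [ih d hnd2.2 (fun q hq => hfresh q (by simp [hq]))]
      simp
    | some v =>
      have hne : ∀ q ∈ rest, q.1 ≠ sp.1 := by
        intro q hq heq
        exact hnd2.1 (heq ▸ List.mem_map_of_mem (f := (·.1)) hq)
      rw [ih (d.insert sp.1 v) hnd2.2
        (fun q hq => by
          rw [PySem.Dict.contains_insert]
          simp [hne q hq, hfresh q (by simp [hq])])]
      rw [PySem.Dict.items_insert_of_not_contains _ _ (hfresh sp (by simp))]
      simp

-- ===== VERDICT (by name: the statement is the Claim_ definition above) =====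
theorem map_semantic_columns_spec : Claim_equal_map_semantic_columns := by
  intro columns _ _
  unfold Spec_map_semantic_columns map_semantic_columns map_semantic_columns_alt
  have hnd : (semanticPatterns.map (·.1)).Nodup := by decide
  rw [aFoldl_items columns semanticPatterns PySem.Dict.empty hnd (by intro sp _; rfl)]
  rw [bFinal_items (fun sp => (columns.foldl bColStep PySem.Dict.empty).get? sp.1)
    semanticPatterns PySem.Dict.empty hnd (by intro sp _; rfl)]
  congr 1
  apply List.filterMap_congr
  intro sp hsp
  rw [bFold_get? sp.1 sp.2 (by rwa [← Prod.mk.eta (p := sp)] at hsp) columns]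
  rfl
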